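-- pv_equiv track=rewrite | github.com/TrinhLK/NaturalBIP-Compiler | test/bool2cnf2dhorn.py | merge_two_pos_list
-- ===== SOURCE A (Python) =====
-- def merge_two_pos_list(l_atom_1, l_atom_2):
-- 	result = []
-- 	if l_atom_1 == []:
-- 		return l_atom_2
-- 	else:
-- 		if l_atom_2 == []:
-- 			return l_atom_1
-- 		for i in l_atom_1:
-- 			temp_list = []
-- 			if isinstance(i, list):
-- 				for i_el in i:
-- 					temp_list.append(i_el)
-- 			else:
-- 				temp_list.append(i)
--
--
-- 			for j in l_atom_2:
-- 				temp_list_j = []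
-- 				if isinstance(j, list):
-- 					for j_el in j:
-- 						temp_list_j.append(j_el)
-- 				else:
-- 					temp_list_j.append(j)
--
-- 				result.append(temp_list + temp_list_j)
--
-- 	return result
-- ===== SOURCE B (Python) =====
-- def merge_two_pos_list(l_atom_1, l_atom_2):
--     if l_atom_1 == []:
--         return l_atom_2
--     if l_atom_2 == []:
--         return l_atom_1
--     norm = lambda x: list(x) if isinstance(x, list) else [x]
--     m = len(l_atom_2)
--     return [norm(l_atom_1[k // m]) + norm(l_atom_2[k % m])
--             for k in range(len(l_atom_1) * m)]
-- ===== Notes on version B (the rewrite author's own statement) =====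
-- stated objective: alternative
-- what changed: B replaces A's nested accumulator loops with a single flat loop over range(n*m) that addresses each factor directly by divmod index arithmetic (row k // m paired with column k % m).
import Mathlib
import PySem

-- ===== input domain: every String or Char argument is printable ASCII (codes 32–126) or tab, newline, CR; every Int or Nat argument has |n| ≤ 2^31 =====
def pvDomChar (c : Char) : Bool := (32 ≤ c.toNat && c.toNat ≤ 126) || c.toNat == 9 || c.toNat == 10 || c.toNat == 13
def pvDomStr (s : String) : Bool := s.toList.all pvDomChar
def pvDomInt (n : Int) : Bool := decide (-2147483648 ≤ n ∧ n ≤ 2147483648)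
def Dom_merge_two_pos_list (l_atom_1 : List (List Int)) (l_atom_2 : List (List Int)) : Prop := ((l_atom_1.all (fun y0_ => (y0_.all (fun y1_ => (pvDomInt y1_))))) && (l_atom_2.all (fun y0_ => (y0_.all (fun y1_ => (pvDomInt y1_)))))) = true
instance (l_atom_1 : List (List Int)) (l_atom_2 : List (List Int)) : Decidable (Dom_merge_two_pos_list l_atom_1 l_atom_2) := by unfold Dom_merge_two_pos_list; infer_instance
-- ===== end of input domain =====

-- B replaces A's nested accumulator loops by one flat loop over range(n*m) addressing
-- each factor via divmod index arithmetic (objective: alternative, same cost).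

-- ===== PORT A =====
-- elements are List Int, so Python's isinstance(i, list) branch is always taken;
-- the temp-list build 'for el in i: temp.append(el)' is the foldl with append below.
def merge_two_pos_list (l_atom_1 : List (List Int)) (l_atom_2 : List (List Int)) : List (List Int) :=
  if l_atom_1 = [] then l_atom_2
  else if l_atom_2 = [] then l_atom_1
  else
    l_atom_1.foldl (fun result i =>
      let temp_list := i.foldl (fun t x => t ++ [x]) []
      l_atom_2.foldl (fun res j =>
        let temp_list_j := j.foldl (fun t x => t ++ [x]) []
        res ++ [temp_list ++ temp_list_j]) result) []

-- ===== PORT B =====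
-- range(n*m) with n*m ≥ 0 is List.range; k // m and k % m on the nonnegative Nat
-- indices agree with Python's floordiv/mod; both indices are in range, so the
-- getD default [] is never used (isinstance is again always the list branch).
def merge_two_pos_list_alt (l_atom_1 : List (List Int)) (l_atom_2 : List (List Int)) : List (List Int) :=
  if l_atom_1 = [] then l_atom_2
  else if l_atom_2 = [] then l_atom_1
  else
    let m := l_atom_2.length
    (List.range (l_atom_1.length * m)).map
      (fun k => l_atom_1.getD (k / m) [] ++ l_atom_2.getD (k % m) [])

-- ===== PRECONDITION & SPEC =====
def Spec_merge_two_pos_list (l_atom_1 : List (List Int)) (l_atom_2 : List (List Int)) (out : List (List Int)) : Prop := out = merge_two_pos_list_alt l_atom_1 l_atom_2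
instance (l_atom_1 : List (List Int)) (l_atom_2 : List (List Int)) (out : List (List Int)) : Decidable (Spec_merge_two_pos_list l_atom_1 l_atom_2 out) := by unfold Spec_merge_two_pos_list; infer_instance

-- ===== CLAIM (what is proved, stated in full; the proofs are below) =====
def Claim_equal_merge_two_pos_list : Prop := ∀ (l_atom_1 : List (List Int)) (l_atom_2 : List (List Int)), Dom_merge_two_pos_list l_atom_1 l_atom_2 → Spec_merge_two_pos_list l_atom_1 l_atom_2 (merge_two_pos_list l_atom_1 l_atom_2)

-- ===== LEMMAS AND PROOFS =====

-- A's inner l_atom_2 loop appends one row per j onto the accumulator.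
theorem inner_loop_eq (l2 : List (List Int)) (t : List Int) (acc : List (List Int)) :
    l2.foldl (fun res j => res ++ [t ++ j]) acc = acc ++ l2.map (fun b => t ++ b) := by
  induction l2 generalizing acc with
  | nil => simp
  | cons j l2 ih =>
      simp only [List.foldl_cons]
      rw [ih]
      simp

-- A's outer loop therefore accumulates the cross product block by block.
theorem outer_loop_eq (l1 l2 : List (List Int)) (acc : List (List Int)) :
    l1.foldl (fun result i => l2.foldl (fun res j => res ++ [i ++ j]) result) acc
    = acc ++ l1.flatMap (fun a => l2.map (fun b => a ++ b)) := by
  induction l1 generalizing acc with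
  | nil => simp
  | cons i l1 ih =>
      simp only [List.foldl_cons]
      rw [inner_loop_eq, ih, List.flatMap_cons, List.append_assoc]

-- the flat divmod loop splits into n blocks of m consecutive indices
theorem range_mul_divmod {α : Type} (f : Nat → Nat → α) (n m : Nat) (hm : 0 < m) :
    (List.range (n * m)).map (fun k => f (k / m) (k % m))
    = (List.range n).flatMap (fun i => (List.range m).map (fun j => f i j)) := by
  induction n with
  | zero => simp
  | succ n ih =>
      rw [Nat.succ_mul, List.range_add, List.map_append, ih, List.range_succ,
        List.flatMap_append]
      congr 1
      simp only [List.map_map, List.flatMap_cons, List.flatMap_nil, List.append_nil]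
      apply List.map_congr_left
      intro j hj
      simp only [List.mem_range] at hj
      simp only [Function.comp_apply]
      congr 1
      · rw [Nat.add_comm, Nat.add_mul_div_right j n hm, Nat.div_eq_of_lt hj, Nat.zero_add]
      · rw [Nat.add_comm, Nat.add_mul_mod_self_right, Nat.mod_eq_of_lt hj]

-- indexing by all positions reproduces the list (map version)
theorem map_range_getD {α β : Type} (l : List α) (d : α) (g : α → β) :
    (List.range l.length).map (fun i => g (l.getD i d)) = l.map g := by
  induction l with
  | nil => simp
  | cons x xs ih =>
      rw [List.length_cons, List.range_succ_eq_map, List.map_cons]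
      simp only [List.getD_cons_zero, List.map_map, Function.comp_def, List.getD_cons_succ]
      rw [ih, List.map_cons]

-- indexing by all positions reproduces the list (flatMap version)
theorem flatMap_range_getD {α β : Type} (l : List α) (d : α) (g : α → List β) :
    (List.range l.length).flatMap (fun i => g (l.getD i d)) = l.flatMap g := by
  induction l with
  | nil => simp
  | cons x xs ih =>
      rw [List.length_cons, List.range_succ_eq_map, List.flatMap_cons]
      simp only [List.getD_cons_zero, List.flatMap_map, List.getD_cons_succ]
      rw [ih, List.flatMap_cons]

-- ===== VERDICT (by name: the statement is the Claim_ definition above) =====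
theorem merge_two_pos_list_spec : Claim_equal_merge_two_pos_list := by
  intro l1 l2 _
  unfold Spec_merge_two_pos_list merge_two_pos_list merge_two_pos_list_alt
  split_ifs with h1 h2
  · rfl
  · rfl
  · simp only [PySem.List.foldl_append_singleton_eq_self, List.nil_append]
    rw [outer_loop_eq, List.nil_append,
      range_mul_divmod (fun i j => l1.getD i [] ++ l2.getD j []) l1.length l2.length
        (List.length_pos_iff.mpr h2),
      flatMap_range_getD l1 [] (fun a => (List.range l2.length).map (fun j => a ++ l2.getD j []))]
    have hfun : (fun a : List Int => (List.range l2.length).map (fun j => a ++ l2.getD j []))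
        = (fun a => l2.map (fun b => a ++ b)) := by
      funext a
      exact map_range_getD l2 [] (fun b => a ++ b)
    rw [hfun]
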